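-- pv_equiv track=rewrite | github.com/HITOfficial/python-laboratories | lab-1/logical_expressions.py | bal
-- ===== SOURCE A (Python) =====
-- def bal(expr, op):
--     brackets = 0
--     for i in range(len(expr)-1, -1, -1):
--         if expr[i] == '(':
--             brackets += 1
--         if expr[i] == ')':
--             brackets -= 1
--         if expr[i] in op and len(expr) > 0:
--             return i
--     return -1
-- ===== SOURCE B (Python) =====
-- def bal(expr, op):
--     last = -1
--     for i, c in enumerate(expr):
--         if c in op:
--             last = i
--     return last
-- ===== Notes on version B (the rewrite author's own statement) =====
-- stated objective: idiomatic
-- what changed: A scans right-to-left and returns early at the first operator; B is a single forward pass over enumerate(expr) keeping the last matching index, dropping the dead bracket counter and the always-true length check.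
import Mathlib
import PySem

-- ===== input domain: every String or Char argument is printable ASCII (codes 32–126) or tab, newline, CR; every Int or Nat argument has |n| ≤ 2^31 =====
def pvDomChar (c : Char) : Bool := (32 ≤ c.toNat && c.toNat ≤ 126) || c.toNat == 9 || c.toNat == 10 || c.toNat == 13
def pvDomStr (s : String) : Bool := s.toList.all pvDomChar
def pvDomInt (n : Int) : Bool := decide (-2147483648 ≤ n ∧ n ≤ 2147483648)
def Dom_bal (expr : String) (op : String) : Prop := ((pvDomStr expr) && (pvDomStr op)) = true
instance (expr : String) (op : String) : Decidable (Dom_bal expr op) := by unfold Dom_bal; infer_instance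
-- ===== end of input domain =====

-- B replaces A's right-to-left early-return scan by a single forward pass keeping the last
-- matching index, dropping the dead bracket counter and the always-true length check (idiomatic).

-- ===== PORT A =====
-- A's loop over range(len(expr)-1, -1, -1); indices produced by the range are always in
-- bounds, so expr[i] is ported as pyGetD with a junk default (exact here: no IndexError can occur).
def balGo (cs : List Char) (op : List Char) (brackets : Int) : List Int → Int
  | [] => -1
  | i :: rest =>
    let c := PySem.List.pyGetD cs i ' '
    let b1 := if c = '(' then brackets + 1 else brackets
    let b2 := if c = ')' then b1 - 1 else b1
    if PySem.Chars.isIn [c] op && decide (0 < cs.length) then i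
    else balGo cs op b2 rest

def bal (expr : String) (op : String) : Int :=
  balGo expr.toList op.toList 0 (PySem.List.pyRange ((expr.toList.length : Int) - 1) (-1) (-1))

-- ===== PORT B =====
def bal_alt (expr : String) (op : String) : Int :=
  (PySem.List.enumerate expr.toList 0).foldl
    (fun last p => if PySem.Chars.isIn [p.2] op.toList then p.1 else last) (-1)

-- ===== PRECONDITION & SPEC =====
def Spec_bal (expr : String) (op : String) (out : Int) : Prop := out = bal_alt expr op
instance (expr : String) (op : String) (out : Int) : Decidable (Spec_bal expr op out) := by unfold Spec_bal; infer_instance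

-- ===== CLAIM (what is proved, stated in full; the proofs are below) =====
def Claim_equal_bal : Prop := ∀ (expr : String) (op : String), Dom_bal expr op → Spec_bal expr op (bal expr op)

-- ===== LEMMAS AND PROOFS =====

-- first-match scan, generic in the test; proof-side model of A's loop body
def firstHit (p : Int → Bool) : List Int → Int → Int
  | [], acc => acc
  | i :: rest, acc => if p i then i else firstHit p rest acc

-- A's bracket counter never influences the result
lemma balGo_eq_firstHit (cs op : List Char) :
    ∀ (L : List Int) (b : Int),
      balGo cs op b L
        = firstHit (fun i => PySem.Chars.isIn [PySem.List.pyGetD cs i ' '] op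
                              && decide (0 < cs.length)) L (-1) := by
  intro L
  induction L with
  | nil => intro b; rfl
  | cons i rest ih =>
      intro b
      simp only [balGo, firstHit]
      split
      · rfl
      · exact ih _

lemma firstHit_snoc (p : Int → Bool) (xs : List Int) (i acc : Int) :
    firstHit p (xs ++ [i]) acc = firstHit p xs (if p i then i else acc) := by
  induction xs with
  | nil => rfl
  | cons x xs ih =>
      simp only [List.cons_append, firstHit]
      split
      · rfl
      · exact ih

-- the last-match forward fold equals the first-match scan of the reversed list
lemma foldl_last_eq_firstHit_reverse (p : Int → Bool) :
    ∀ (L : List Int) (acc : Int),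
      L.foldl (fun last j => if p j then j else last) acc = firstHit p L.reverse acc := by
  intro L
  induction L with
  | nil => intro acc; rfl
  | cons i rest ih =>
      intro acc
      simp only [List.foldl_cons, List.reverse_cons]
      rw [ih, firstHit_snoc]

theorem bal_eq_alt (expr op : String) : bal expr op = bal_alt expr op := by
  unfold bal bal_alt
  set cs := expr.toList with hcs
  set ops := op.toList with hops
  rw [PySem.List.pyRange_neg_one_eq_reverse]
  have h0 : ((-1 : Int) + 1) = 0 := by norm_num
  have h1 : ((cs.length : Int) - 1 + 1) = (cs.length : Int) := by ring
  rw [h0, h1]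
  rw [balGo_eq_firstHit]
  rw [← foldl_last_eq_firstHit_reverse]
  rw [PySem.List.enumerate_eq_map_pyRange cs ' ', List.foldl_map]
  simp only [PySem.List.len_eq]
  by_cases hn : cs.length = 0
  · simp [hn]
  · have hpos : 0 < cs.length := Nat.pos_of_ne_zero hn
    apply PySem.List.foldl_congr_mem
    intro acc j _
    simp [hpos]

-- ===== VERDICT (by name: the statement is the Claim_ definition above) =====
theorem bal_spec : Claim_equal_bal := by
  intro expr op _
  unfold Spec_bal
  exact bal_eq_alt expr op
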